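-- pv_equiv track=rewrite | github.com/luciasucunza/unsam_python | ejercicios_python/propaga_clase4.py | propagar_a_derecha
-- ===== SOURCE A (Python) =====
-- def propagar_a_derecha(l):
--     n = len(l)
--     m = l.copy()
--     for i,e in enumerate(m):
--         if e==1 and i<n-1:
--             if m[i+1]==0:
--                 m[i+1] = 1
--     return m
-- ===== SOURCE B (Python) =====
-- def propagar_a_derecha(l):
--     out = []
--     carry = 0
--     for e in l:
--         if e == 0 and carry == 1:
--             out.append(1)
--         else:
--             out.append(e)
--             carry = e
--     return out
-- ===== Notes on version B (the rewrite author's own statement) =====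
-- stated objective: alternative
-- what changed: B builds a fresh output list in one forward pass driven by a running carry (the effective previous value), instead of A's in-place mutation of a copy with an m[i+1] look-ahead write read back by the live iterator.
import Mathlib
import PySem

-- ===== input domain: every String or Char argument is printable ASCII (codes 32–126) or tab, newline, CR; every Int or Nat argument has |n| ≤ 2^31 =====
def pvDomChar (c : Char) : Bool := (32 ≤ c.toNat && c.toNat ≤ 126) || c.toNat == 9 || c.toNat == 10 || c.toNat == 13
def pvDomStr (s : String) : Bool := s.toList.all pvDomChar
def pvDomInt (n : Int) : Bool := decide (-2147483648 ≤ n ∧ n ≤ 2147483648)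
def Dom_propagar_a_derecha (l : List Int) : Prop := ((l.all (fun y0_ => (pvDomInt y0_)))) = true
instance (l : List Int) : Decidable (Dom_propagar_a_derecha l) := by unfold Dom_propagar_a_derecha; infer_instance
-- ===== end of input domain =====

-- B replaces A's in-place copy mutation (with look-ahead write) by a single pass
-- building a fresh list with a running carry; alternative decomposition, same cost.


-- ===== PORT A =====
-- the for-loop over the live (mutated) list: at step i, read e = m[i], possibly write m[i+1]
def pvLoopA (m : List Int) (i : Nat) : List Int :=
  if h : i < m.length then
    let e := m.getD i 0
    let m' := if e = 1 ∧ i < m.length - 1 ∧ m.getD (i+1) 0 = 0 then m.set (i+1) 1 else m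
    pvLoopA m' (i+1)
  else m
termination_by m.length - i
decreasing_by
  split
  · simp only [List.length_set]; omega
  · omega

def propagar_a_derecha (l : List Int) : List Int := pvLoopA l 0

-- ===== PORT B =====
def pvLoopB (carry : Int) (l : List Int) : List Int :=
  match l with
  | [] => []
  | e :: t => if e = 0 ∧ carry = 1 then 1 :: pvLoopB carry t else e :: pvLoopB e t

def propagar_a_derecha_alt (l : List Int) : List Int := pvLoopB 0 l

-- ===== PRECONDITION & SPEC =====
def Spec_propagar_a_derecha (l : List Int) (out : List Int) : Prop := out = propagar_a_derecha_alt l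
instance (l : List Int) (out : List Int) : Decidable (Spec_propagar_a_derecha l out) := by unfold Spec_propagar_a_derecha; infer_instance

-- ===== CLAIM (what is proved, stated in full; the proofs are below) =====
def Claim_equal_propagar_a_derecha : Prop := ∀ (l : List Int), Dom_propagar_a_derecha l → Spec_propagar_a_derecha l (propagar_a_derecha l)

-- ===== LEMMAS AND PROOFS =====

-- A's loop rephrased as list recursion over the unprocessed suffix (head = current value,
-- which may already have been written by the previous step)
def pvG (l : List Int) : List Int :=
  match l with
  | [] => []
  | [e] => [e]
  | e :: f :: t =>
      if e = 1 ∧ f = 0 then e :: pvG (1 :: t) else e :: pvG (f :: t)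
termination_by l.length

theorem pvLoopA_eq_pvG : ∀ (suf pre : List Int), pvLoopA (pre ++ suf) pre.length = pre ++ pvG suf := by
  intro suf
  induction suf using pvG.induct with
  | case1 =>
      intro pre
      rw [pvLoopA.eq_def, pvG]
      simp
  | case2 e =>
      intro pre
      rw [pvLoopA.eq_def, pvG]
      have h1 : pre.length < (pre ++ [e]).length := by simp
      simp only [h1, dif_pos]
      have he : (pre ++ [e]).getD pre.length 0 = e := by
        simp [List.getD]
      have hn : ¬ (pre.length < (pre ++ [e]).length - 1) := by simp
      simp only [he, hn]
      rw [pvLoopA.eq_def]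
      simp
  | case3 e f t hef ih =>
      intro pre
      rw [pvLoopA.eq_def, pvG]
      have h1 : pre.length < (pre ++ e :: f :: t).length := by simp
      simp only [h1, dif_pos]
      have he : (pre ++ e :: f :: t).getD pre.length 0 = e := by
        simp [List.getD]
      have hf : (pre ++ e :: f :: t).getD (pre.length + 1) 0 = f := by
        simp [List.getD]
      have hn : pre.length < (pre ++ e :: f :: t).length - 1 := by simp
      have hset : (pre ++ e :: f :: t).set (pre.length + 1) 1 = pre ++ e :: 1 :: t := by
        rw [List.set_append]
        simp
      simp only [hef, and_true, if_pos]
      have := ih (pre ++ [e])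
      simpa [hef] using this
  | case4 e f t hef ih =>
      intro pre
      rw [pvLoopA.eq_def, pvG]
      have h1 : pre.length < (pre ++ e :: f :: t).length := by simp
      simp only [h1, dif_pos]
      have := ih (pre ++ [e])
      simp only [List.append_assoc, List.cons_append, List.nil_append, List.length_append,
        List.length_cons, List.length_nil] at this
      simp [hef, this]

theorem pvG_eq_pvLoopB : ∀ (t : List Int) (e : Int), pvG (e :: t) = e :: pvLoopB e t := by
  intro t
  induction t with
  | nil => intro e; rw [pvG, pvLoopB]
  | cons f u ih =>
      intro e
      rw [pvG, pvLoopB]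
      by_cases h : e = 1 ∧ f = 0
      · obtain ⟨h1, h2⟩ := h
        subst h1; subst h2
        simp only [and_self, if_pos, ih]
      · have h' : ¬ (f = 0 ∧ e = 1) := by tauto
        simp [h, h', ih]

-- ===== VERDICT (by name: the statement is the Claim_ definition above) =====
theorem propagar_a_derecha_spec : Claim_equal_propagar_a_derecha := by
  intro l _
  unfold Spec_propagar_a_derecha propagar_a_derecha propagar_a_derecha_alt
  have h := pvLoopA_eq_pvG l []
  simp only [List.nil_append, List.length_nil] at h
  rw [h]
  cases l with
  | nil => simp [pvG, pvLoopB]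
  | cons e t =>
      rw [pvG_eq_pvLoopB, pvLoopB]
      have : ¬ (e = 0 ∧ (0 : Int) = 1) := by simp
      simp
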